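-- pv_equiv track=rewrite | github.com/rysweet/azure-tenant-grapher | src/hierarchical_spec_generator.py | _infer_resource_group_purpose
-- ===== SOURCE A (Python) =====
-- from typing import Any, Dict, Optional
--
-- def _infer_resource_group_purpose(rg_data: Dict[str, Any]) -> str:
--     """Infer the purpose of a resource group based on its resources.
--
--     Args:
--         rg_data: Resource group data including resources
--
--     Returns:
--         Inferred purpose string
--     """
--     resources = rg_data["resources"]
--     if not resources:
--         return "Empty Resource Group"
--
--     # Analyze resource composition
--     resource_types = [r.get("type", "") for r in resources]
--
--     # Common patterns
--     if any("Microsoft.Web" in t for t in resource_types):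
--         if any("Microsoft.Sql" in t for t in resource_types):
--             return "Web Application with Database"
--         return "Web Application Resources"
--     elif any("Microsoft.Compute/virtualMachines" in t for t in resource_types):
--         vm_count = sum(1 for t in resource_types if "virtualMachines" in t)
--         if vm_count > 3:
--             return "Virtual Machine Scale Set"
--         return "Virtual Machine Infrastructure"
--     elif any("Microsoft.Storage" in t for t in resource_types):
--         return "Storage Resources"
--     elif any("Microsoft.Network" in t for t in resource_types):
--         return "Networking Infrastructure"
--
--     return "Mixed Resources"
-- ===== SOURCE B (Python) =====
-- def _infer_resource_group_purpose(rg_data):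
--     resources = rg_data["resources"]
--     if not resources:
--         return "Empty Resource Group"
--     has_web = has_sql = has_vm = has_storage = has_network = False
--     vm_count = 0
--     for r in resources:
--         t = r.get("type", "")
--         if "Microsoft.Web" in t:
--             has_web = True
--         if "Microsoft.Sql" in t:
--             has_sql = True
--         if "Microsoft.Compute/virtualMachines" in t:
--             has_vm = True
--         if "virtualMachines" in t:
--             vm_count += 1
--         if "Microsoft.Storage" in t:
--             has_storage = True
--         if "Microsoft.Network" in t:
--             has_network = True
--     if has_web:
--         return "Web Application with Database" if has_sql else "Web Application Resources"
--     if has_vm: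
--         return "Virtual Machine Scale Set" if vm_count > 3 else "Virtual Machine Infrastructure"
--     if has_storage:
--         return "Storage Resources"
--     if has_network:
--         return "Networking Infrastructure"
--     return "Mixed Resources"
-- ===== Notes on version B (the rewrite author's own statement) =====
-- stated objective: simpler
-- what changed: Replaces the intermediate type list and up to six separate any()/sum() scans with one pass over the resources that builds boolean/counter accumulators, followed by a scan-free decision tree.
import Mathlib
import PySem

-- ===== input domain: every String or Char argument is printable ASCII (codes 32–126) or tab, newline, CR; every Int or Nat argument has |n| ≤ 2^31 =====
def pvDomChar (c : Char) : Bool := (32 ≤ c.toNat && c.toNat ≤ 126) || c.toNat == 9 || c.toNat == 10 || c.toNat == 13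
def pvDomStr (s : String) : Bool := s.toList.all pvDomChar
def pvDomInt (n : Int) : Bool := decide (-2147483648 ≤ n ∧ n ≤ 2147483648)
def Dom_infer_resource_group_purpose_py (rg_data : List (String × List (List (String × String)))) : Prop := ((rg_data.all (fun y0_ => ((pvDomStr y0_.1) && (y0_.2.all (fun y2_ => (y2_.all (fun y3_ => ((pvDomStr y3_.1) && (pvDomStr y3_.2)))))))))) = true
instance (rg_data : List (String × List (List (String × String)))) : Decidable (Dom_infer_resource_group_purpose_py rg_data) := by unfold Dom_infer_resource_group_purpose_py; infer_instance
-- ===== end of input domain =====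

-- B replaces A's intermediate type list and repeated any()/sum() scans by a single
-- accumulator pass followed by a scan-free decision tree (objective: simpler).
-- ===== PORT A =====
def infer_resource_group_purpose_py (rg_data : List (String × List (List (String × String)))) : String :=
  match (PySem.Dict.mk rg_data).get? "resources" with
  | none => ""            -- KeyError in Python; excluded by Pre_
  | some resources =>
    if resources.isEmpty then "Empty Resource Group"
    else
      let resource_types := resources.map (fun r => (PySem.Dict.mk r).getD "type" "")
      if resource_types.any (fun t => PySem.Str.isIn "Microsoft.Web" t) then
        if resource_types.any (fun t => PySem.Str.isIn "Microsoft.Sql" t) then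
          "Web Application with Database"
        else "Web Application Resources"
      else if resource_types.any (fun t => PySem.Str.isIn "Microsoft.Compute/virtualMachines" t) then
        -- sum(1 for t in resource_types if "virtualMachines" in t)
        let vm_count : Int := (resource_types.countP (fun t => PySem.Str.isIn "virtualMachines" t) : Int)
        if vm_count > 3 then "Virtual Machine Scale Set"
        else "Virtual Machine Infrastructure"
      else if resource_types.any (fun t => PySem.Str.isIn "Microsoft.Storage" t) then
        "Storage Resources"
      else if resource_types.any (fun t => PySem.Str.isIn "Microsoft.Network" t) then
        "Networking Infrastructure"
      else "Mixed Resources"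

-- ===== PORT B =====
-- state: (has_web, has_sql, has_vm, vm_count, has_storage, has_network)
def pvStepB (st : Bool × Bool × Bool × Int × Bool × Bool) (r : List (String × String)) :
    Bool × Bool × Bool × Int × Bool × Bool :=
  let t := (PySem.Dict.mk r).getD "type" ""
  ( st.1 || PySem.Str.isIn "Microsoft.Web" t,
    st.2.1 || PySem.Str.isIn "Microsoft.Sql" t,
    st.2.2.1 || PySem.Str.isIn "Microsoft.Compute/virtualMachines" t,
    (if PySem.Str.isIn "virtualMachines" t then st.2.2.2.1 + 1 else st.2.2.2.1),
    st.2.2.2.2.1 || PySem.Str.isIn "Microsoft.Storage" t,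
    st.2.2.2.2.2 || PySem.Str.isIn "Microsoft.Network" t )

def infer_resource_group_purpose_py_alt (rg_data : List (String × List (List (String × String)))) : String :=
  match (PySem.Dict.mk rg_data).get? "resources" with
  | none => ""            -- KeyError in Python; excluded by Pre_
  | some resources =>
    if resources.isEmpty then "Empty Resource Group"
    else
      let st := resources.foldl pvStepB (false, false, false, (0 : Int), false, false)
      if st.1 then
        if st.2.1 then "Web Application with Database" else "Web Application Resources"
      else if st.2.2.1 then
        if st.2.2.2.1 > 3 then "Virtual Machine Scale Set" else "Virtual Machine Infrastructure"
      else if st.2.2.2.2.1 then "Storage Resources"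
      else if st.2.2.2.2.2 then "Networking Infrastructure"
      else "Mixed Resources"

-- ===== PRECONDITION & SPEC =====
-- Pre_ excludes only inputs with no "resources" key, on which Python A raises KeyError (and B too).
def Pre_infer_resource_group_purpose_py (rg_data : List (String × List (List (String × String)))) : Prop :=
  (PySem.Dict.mk rg_data).contains "resources" = true
instance (rg_data : List (String × List (List (String × String)))) : Decidable (Pre_infer_resource_group_purpose_py rg_data) := by unfold Pre_infer_resource_group_purpose_py; infer_instance
def pvWitness_infer_resource_group_purpose_py : (List (String × List (List (String × String)))) :=
  [("resources", [[("type", "Microsoft.Storage/storageAccounts")]])]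
def Spec_infer_resource_group_purpose_py (rg_data : List (String × List (List (String × String)))) (out : String) : Prop := out = infer_resource_group_purpose_py_alt rg_data
instance (rg_data : List (String × List (List (String × String)))) (out : String) : Decidable (Spec_infer_resource_group_purpose_py rg_data out) := by unfold Spec_infer_resource_group_purpose_py; infer_instance

-- ===== CLAIM (what is proved, stated in full; the proofs are below) =====
def Claim_equal_infer_resource_group_purpose_py : Prop := ∀ (rg_data : List (String × List (List (String × String)))), Dom_infer_resource_group_purpose_py rg_data → Pre_infer_resource_group_purpose_py rg_data → Spec_infer_resource_group_purpose_py rg_data (infer_resource_group_purpose_py rg_data)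

-- ===== LEMMAS AND PROOFS =====
-- the fold computes exactly the six scans A performs
theorem pvFoldB_eq (l : List (List (String × String))) (s : Bool × Bool × Bool × Int × Bool × Bool) :
    l.foldl pvStepB s =
      ( s.1 || l.any (fun r => PySem.Str.isIn "Microsoft.Web" ((PySem.Dict.mk r).getD "type" "")),
        s.2.1 || l.any (fun r => PySem.Str.isIn "Microsoft.Sql" ((PySem.Dict.mk r).getD "type" "")),
        s.2.2.1 || l.any (fun r => PySem.Str.isIn "Microsoft.Compute/virtualMachines" ((PySem.Dict.mk r).getD "type" "")),
        s.2.2.2.1 + (l.countP (fun r => PySem.Str.isIn "virtualMachines" ((PySem.Dict.mk r).getD "type" "")) : Int),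
        s.2.2.2.2.1 || l.any (fun r => PySem.Str.isIn "Microsoft.Storage" ((PySem.Dict.mk r).getD "type" "")),
        s.2.2.2.2.2 || l.any (fun r => PySem.Str.isIn "Microsoft.Network" ((PySem.Dict.mk r).getD "type" "")) ) := by
  induction l generalizing s with
  | nil => simp
  | cons x xs ih =>
    simp only [List.foldl_cons, ih, pvStepB, List.any_cons, List.countP_cons]
    obtain ⟨a, b, c, d, e, f⟩ := s
    simp only []
    refine Prod.ext ?_ (Prod.ext ?_ (Prod.ext ?_ (Prod.ext ?_ (Prod.ext ?_ ?_)))) <;>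
      simp [Bool.or_assoc]; split_ifs <;> omega

-- ===== VERDICT (by name: the statement is the Claim_ definition above) =====
theorem infer_resource_group_purpose_py_spec : Claim_equal_infer_resource_group_purpose_py := by
  intro rg_data _ _
  unfold Spec_infer_resource_group_purpose_py
  unfold infer_resource_group_purpose_py infer_resource_group_purpose_py_alt
  cases h : (PySem.Dict.mk rg_data).get? "resources" with
  | none => rfl
  | some resources =>
    simp only [pvFoldB_eq, Bool.false_or, List.any_map, List.countP_map]
    simp only [Function.comp_def, zero_add]
    rfl
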